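-- pv_equiv track=rewrite | github.com/PedroLauand/EvansScenario | Indices.py | evansAmarginalA3
-- ===== SOURCE A (Python) =====
-- def evansAmarginalA3(a0,a1):
--     #Index for Alice's marginal  joint distribution q(a0,a1) for evans scenario where |A|=3.
--     i=0
--     for A1 in range(3):
--         for A0 in range(3):
--             if A1==a1 and A0==a0 :
--                 return i
--             else :
--                 i=i+1
-- ===== SOURCE B (Python) =====
-- def evansAmarginalA3(a0, a1):
--     # Closed form: row-major flattened index over the 3x3 grid.
--     if 0 <= a0 < 3 and 0 <= a1 < 3:
--         return a1 * 3 + a0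
--     return None
-- ===== Notes on version B (the rewrite author's own statement) =====
-- stated objective: simpler
-- what changed: Replaced the nested scan-and-count loop over the 3x3 grid with a direct range check and the closed-form flattened index a1*3+a0.
import Mathlib
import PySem

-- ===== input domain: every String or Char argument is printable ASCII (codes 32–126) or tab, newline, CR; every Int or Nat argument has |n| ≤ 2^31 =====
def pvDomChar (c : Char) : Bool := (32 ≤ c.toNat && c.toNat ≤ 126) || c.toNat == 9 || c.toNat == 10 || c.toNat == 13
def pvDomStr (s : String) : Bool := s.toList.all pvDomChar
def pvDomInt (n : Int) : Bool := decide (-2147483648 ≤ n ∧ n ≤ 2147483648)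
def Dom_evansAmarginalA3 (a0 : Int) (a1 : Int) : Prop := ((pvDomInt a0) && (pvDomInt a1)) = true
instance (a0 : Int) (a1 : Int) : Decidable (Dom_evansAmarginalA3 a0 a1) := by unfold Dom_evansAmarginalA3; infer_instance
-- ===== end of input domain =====

-- B replaces A's counting scan of the 3x3 grid by the closed-form index (simpler).

-- ===== PORT A =====
-- inner 'for A0 in range(3)': returns (some value) on early return, else (none, updated i)
def evansAInner (a0 a1 A1 : Int) : List Int → Int → Option Int × Int
  | [], i => (none, i)
  | A0 :: rest, i =>
    if A1 == a1 && A0 == a0 then (some i, i) else evansAInner a0 a1 A1 rest (i + 1)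

-- outer 'for A1 in range(3)'
def evansAOuter (a0 a1 : Int) : List Int → Int → Option Int
  | [], _ => none
  | A1 :: rest, i =>
    match evansAInner a0 a1 A1 (PySem.List.pyRange 0 3 1) i with
    | (some r, _) => some r
    | (none, i') => evansAOuter a0 a1 rest i'

def evansAmarginalA3 (a0 : Int) (a1 : Int) : Option Int :=
  evansAOuter a0 a1 (PySem.List.pyRange 0 3 1) 0

-- ===== PORT B =====
def evansAmarginalA3_alt (a0 : Int) (a1 : Int) : Option Int :=
  if 0 ≤ a0 ∧ a0 < 3 ∧ 0 ≤ a1 ∧ a1 < 3 then some (a1 * 3 + a0) else none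

-- ===== PRECONDITION & SPEC =====
def Spec_evansAmarginalA3 (a0 : Int) (a1 : Int) (out : Option Int) : Prop := out = evansAmarginalA3_alt a0 a1
instance (a0 : Int) (a1 : Int) (out : Option Int) : Decidable (Spec_evansAmarginalA3 a0 a1 out) := by unfold Spec_evansAmarginalA3; infer_instance

-- ===== CLAIM (what is proved, stated in full; the proofs are below) =====
def Claim_equal_evansAmarginalA3 : Prop := ∀ (a0 : Int) (a1 : Int), Dom_evansAmarginalA3 a0 a1 → Spec_evansAmarginalA3 a0 a1 (evansAmarginalA3 a0 a1)

-- ===== LEMMAS AND PROOFS =====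
theorem evansAmarginalA3_eq (a0 a1 : Int) : evansAmarginalA3 a0 a1 = evansAmarginalA3_alt a0 a1 := by
  have hr : PySem.List.pyRange 0 3 1 = [0, 1, 2] := by decide
  simp only [evansAmarginalA3, evansAOuter, evansAInner, evansAmarginalA3_alt, hr]
  by_cases h0 : (0 ≤ a0 ∧ a0 < 3 ∧ 0 ≤ a1 ∧ a1 < 3)
  · obtain ⟨ha, hb, hc, hd⟩ := h0
    interval_cases a0 <;> interval_cases a1 <;> decide
  · have ha0 : ¬(a0 = 0 ∨ a0 = 1 ∨ a0 = 2) ∨ ¬(a1 = 0 ∨ a1 = 1 ∨ a1 = 2) := by omega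
    rcases ha0 with h | h <;>
      simp only [beq_iff_eq, Bool.and_eq_true] <;>
      split_ifs <;> simp_all <;> omega

-- ===== VERDICT (by name: the statement is the Claim_ definition above) =====
theorem evansAmarginalA3_spec : Claim_equal_evansAmarginalA3 := by
  intro a0 a1 _
  unfold Spec_evansAmarginalA3
  exact evansAmarginalA3_eq a0 a1
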